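-- pv_equiv track=rewrite | github.com/mateoquartin/Facultad | Todo python/lenguaje/Punto_2.py | cantidad_votantes_genero
-- ===== SOURCE A (Python) =====
-- def cantidad_votantes_genero(votantes):
--
--     votantes_masculinos = 0
--     votantes_femeninos = 0
--     for votante in votantes:
--         if votante == "m":
--             votantes_masculinos += 1
--         elif votante == "f":
--             votantes_femeninos += 1
--     return votantes_masculinos, votantes_femeninos
-- ===== SOURCE B (Python) =====
-- def cantidad_votantes_genero(votantes):
--     # divide and conquer: split in half, count each half recursively, add the pairs
--     if len(votantes) == 0:
--         return 0, 0
--     if len(votantes) == 1: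
--         v = votantes[0]
--         return (1 if v == "m" else 0, 1 if v == "f" else 0)
--     mid = len(votantes) // 2
--     m1, f1 = cantidad_votantes_genero(votantes[:mid])
--     m2, f2 = cantidad_votantes_genero(votantes[mid:])
--     return m1 + m2, f1 + f2
-- ===== Notes on version B (the rewrite author's own statement) =====
-- stated objective: alternative
-- what changed: Replaces A's single accumulating left-to-right loop by a divide-and-conquer recursion that splits the list in half, counts each half recursively, and adds the resulting (m,f) pairs; correct because counting is associative over list concatenation.
import Mathlib
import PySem

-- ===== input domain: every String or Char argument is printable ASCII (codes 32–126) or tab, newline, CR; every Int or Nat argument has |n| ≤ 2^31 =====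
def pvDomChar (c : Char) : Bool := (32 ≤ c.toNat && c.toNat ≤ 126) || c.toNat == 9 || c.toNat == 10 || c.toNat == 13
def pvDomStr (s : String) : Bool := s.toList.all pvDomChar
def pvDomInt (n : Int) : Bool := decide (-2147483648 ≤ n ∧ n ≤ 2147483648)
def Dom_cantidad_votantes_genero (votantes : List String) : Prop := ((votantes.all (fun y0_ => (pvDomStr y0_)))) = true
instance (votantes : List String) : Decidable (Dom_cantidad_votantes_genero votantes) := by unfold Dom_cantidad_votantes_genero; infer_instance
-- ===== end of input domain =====

-- B replaces A's single accumulating loop by a divide-and-conquer recursion on halves (alternative decomposition; no speed claim).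

-- ===== PORT A =====
-- single pass: fold the (masculinos, femeninos) pair through the list, as A's for-loop does
def cantidad_votantes_genero (votantes : List String) : Int × Int :=
  votantes.foldl
    (fun (acc : Int × Int) votante =>
      if votante == "m" then (acc.1 + 1, acc.2)
      else if votante == "f" then (acc.1, acc.2 + 1)
      else acc)
    (0, 0)

-- ===== PORT B =====
-- divide and conquer: base cases for length 0 and 1, otherwise split at mid = len // 2
-- (mid = len // 2 on a nonnegative length: Nat division is exactly Python's //;
--  votantes[0] is in range in the length-1 branch, so pyGet?'s getD default is never used)
def cantidad_votantes_genero_alt (votantes : List String) : Int × Int :=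
  if votantes.length = 0 then (0, 0)
  else if votantes.length = 1 then
    let v := (PySem.List.pyGet? votantes 0).getD ""
    ((if v == "m" then 1 else 0), (if v == "f" then 1 else 0))
  else
    let mid : Nat := votantes.length / 2
    let p1 := cantidad_votantes_genero_alt (PySem.List.slice votantes none (some (mid : Int)))
    let p2 := cantidad_votantes_genero_alt (PySem.List.slice votantes (some (mid : Int)) none)
    (p1.1 + p2.1, p1.2 + p2.2)
termination_by votantes.length
decreasing_by
  · rw [PySem.List.slice_to_natCast]; simp; omega
  · rw [PySem.List.slice_from_natCast]; simp; omega

-- ===== PRECONDITION & SPEC =====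
def Spec_cantidad_votantes_genero (votantes : List String) (out : Int × Int) : Prop := out = cantidad_votantes_genero_alt votantes
instance (votantes : List String) (out : Int × Int) : Decidable (Spec_cantidad_votantes_genero votantes out) := by unfold Spec_cantidad_votantes_genero; infer_instance

-- ===== CLAIM (what is proved, stated in full; the proofs are below) =====
def Claim_equal_cantidad_votantes_genero : Prop := ∀ (votantes : List String), Dom_cantidad_votantes_genero votantes → Spec_cantidad_votantes_genero votantes (cantidad_votantes_genero votantes)

-- ===== LEMMAS AND PROOFS =====
-- loop invariant for A: the fold adds the two counts onto any starting accumulator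
theorem cantidad_fold_eq (votantes : List String) (a b : Int) :
    votantes.foldl
      (fun (acc : Int × Int) votante =>
        if votante == "m" then (acc.1 + 1, acc.2)
        else if votante == "f" then (acc.1, acc.2 + 1)
        else acc)
      (a, b)
    = (a + (votantes.count "m" : Int), b + (votantes.count "f" : Int)) := by
  induction votantes generalizing a b with
  | nil => simp
  | cons x xs ih =>
    rw [List.foldl_cons]
    by_cases hm : x = "m"
    · subst hm
      simp only [beq_self_eq_true, if_true]
      rw [ih]
      simp
      ring
    · by_cases hf : x = "f"
      · subst hf
        simp only [show (("f" : String) == "m") = false by decide, Bool.false_eq_true,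
          if_false, beq_self_eq_true, if_true]
        rw [ih]
        simp
        ring
      · rw [if_neg (by simp [hm] : ¬((x == "m") = true)),
           if_neg (by simp [hf] : ¬((x == "f") = true)), ih]
        simp [hm, hf]

-- characterisation of B: the divide-and-conquer recursion computes the two counts
theorem cantidad_alt_eq_counts (votantes : List String) :
    cantidad_votantes_genero_alt votantes
      = ((votantes.count "m" : Int), (votantes.count "f" : Int)) := by
  rw [cantidad_votantes_genero_alt]
  split_ifs with h0 h1
  · rw [List.length_eq_zero_iff.mp h0]; simp
  · obtain ⟨v, rfl⟩ := List.length_eq_one_iff.mp h1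
    simp [PySem.List.pyGet?, PySem.List.pyIdx?, List.count_cons]
  · have e1 := cantidad_alt_eq_counts (PySem.List.slice votantes none (some ((votantes.length / 2 : Nat) : Int)))
    have e2 := cantidad_alt_eq_counts (PySem.List.slice votantes (some ((votantes.length / 2 : Nat) : Int)) none)
    rw [PySem.List.slice_to_natCast] at e1
    rw [PySem.List.slice_from_natCast] at e2
    simp only [PySem.List.slice_to_natCast, PySem.List.slice_from_natCast, e1, e2]
    have hm := congrArg (List.count "m") (List.take_append_drop (votantes.length / 2) votantes)
    have hf := congrArg (List.count "f") (List.take_append_drop (votantes.length / 2) votantes)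
    rw [List.count_append] at hm hf
    simp only [Prod.mk.injEq]
    constructor <;> omega
termination_by votantes.length
decreasing_by
  · rw [PySem.List.slice_to_natCast]; simp; omega
  · rw [PySem.List.slice_from_natCast]; simp; omega

-- ===== VERDICT (by name: the statement is the Claim_ definition above) =====
theorem cantidad_votantes_genero_spec : Claim_equal_cantidad_votantes_genero := by
  intro votantes _
  unfold Spec_cantidad_votantes_genero cantidad_votantes_genero
  rw [cantidad_fold_eq, cantidad_alt_eq_counts]
  simp
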